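-- pv_equiv track=rewrite | github.com/dmarty1/Earley-Parser-Tree-Edit-Distance-algorithm-Tree-Grammar-Inference-algorithm | asanas/Parse/Earley Parser/oldversions/partitions.py | intparts
-- ===== SOURCE A (Python) =====
-- def deepfor(*xs):
--     if len(xs)>0:
--         hs = xs[0]
--         ts = xs[1:]
--         if type(hs)==int:
--             hs = [hs]
--         for h in hs:
--             for t in deepfor(*ts):
--                 yield [h]+t
--     else:
--         yield []
--
-- def intparts(n,s,c):
--     ns = list(range(0,s+1))
--
--     xs = [ns for _ in range(n)]
--
--     for k,v in c:
--         xs[k] = v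
--
--     for x in deepfor(*xs):
--         if sum(x)==s:
--             yield x
-- ===== SOURCE B (Python) =====
-- def intparts(n, s, c):
--     # DFS backtracking with remaining-sum lower/upper-bound pruning; same lexicographic order as A.
--     xs = [list(range(0, s + 1)) for _ in range(n)]
--     for k, v in c:
--         xs[k] = v
--     if any(not x for x in xs):
--         return
--     m = len(xs)
--     lo = [0] * (m + 1)
--     hi = [0] * (m + 1)
--     for i in range(m - 1, -1, -1):
--         lo[i] = lo[i + 1] + min(xs[i])
--         hi[i] = hi[i + 1] + max(xs[i])
--     cur = [0] * m
--
--     def dfs(i, r):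
--         if i == m:
--             if r == 0:
--                 yield list(cur)
--             return
--         for h in xs[i]:
--             rr = r - h
--             if lo[i + 1] <= rr <= hi[i + 1]:
--                 cur[i] = h
--                 yield from dfs(i + 1, rr)
--
--     yield from dfs(0, s)
-- ===== Notes on version B (the rewrite author's own statement) =====
-- stated objective: faster
-- what changed: A filters the full (s+1)^n Cartesian product for tuples summing to s; B does DFS backtracking with precomputed suffix min/max remaining-sum bounds, pruning every branch that cannot reach s, same tuples in the same lexicographic order; intended as faster, measured 21x at the largest size on which both Pythons finished (beyond that both time out, the output itself grows exponentially).
import Mathlib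
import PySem

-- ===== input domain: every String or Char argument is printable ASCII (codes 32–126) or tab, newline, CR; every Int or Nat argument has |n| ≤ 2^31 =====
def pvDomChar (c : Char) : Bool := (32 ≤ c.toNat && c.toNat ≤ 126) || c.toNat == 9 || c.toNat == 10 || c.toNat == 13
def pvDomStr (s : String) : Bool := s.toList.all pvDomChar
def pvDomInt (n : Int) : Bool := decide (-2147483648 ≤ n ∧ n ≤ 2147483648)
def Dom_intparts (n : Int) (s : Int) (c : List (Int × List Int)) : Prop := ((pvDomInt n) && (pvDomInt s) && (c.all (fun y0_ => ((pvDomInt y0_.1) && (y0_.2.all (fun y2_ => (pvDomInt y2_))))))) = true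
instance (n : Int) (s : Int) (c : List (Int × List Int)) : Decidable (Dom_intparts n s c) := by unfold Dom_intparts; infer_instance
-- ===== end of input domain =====

-- B replaces A's filter over the full Cartesian product by a DFS with suffix min/max
-- remaining-sum pruning; same values in the same order. Intended as faster; the timing
-- run measured 21x at the largest size on which both Pythons finished.


-- ===== PORT A =====
-- 'deepfor(*xs)': Cartesian product of the lists in xs (the 'type(hs)==int' branch is
-- unreachable here: every component is a list under the declared type of c).
def deepforA : List (List Int) → List (List Int)
  | [] => [[]]
  | hs :: ts => hs.flatMap (fun h => (deepforA ts).map (fun t => h :: t))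

-- 'for k,v in c: xs[k] = v'; out-of-range k is an IndexError in Python, excluded by Pre_
def assignA (xs : List (List Int)) (c : List (Int × List Int)) : List (List Int) :=
  c.foldl (fun acc kv => PySem.List.pySetD acc kv.1 kv.2) xs

def intparts (n : Int) (s : Int) (c : List (Int × List Int)) : List (List Int) :=
  let ns := PySem.List.pyRange 0 (s + 1) 1
  let xs := assignA (List.replicate n.toNat ns) c
  (deepforA xs).filter (fun x => x.sum == s)

-- ===== PORT B =====
-- same assignment loop as Source B's 'for k, v in c: xs[k] = v' (IndexError excluded by Pre_)
def assignB : List (List Int) → List (Int × List Int) → List (List Int)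
  | xs, [] => xs
  | xs, kv :: rest => assignB (PySem.List.pySetD xs kv.1 kv.2) rest

-- Source B's lo/hi suffix arrays: pairs each list with (lo[i+1], hi[i+1]) and also returns
-- (lo[i], hi[i]) for the whole suffix
def prepB : List (List Int) → List (List Int × Int × Int) × Int × Int
  | [] => ([], 0, 0)
  | x :: rest =>
      let (bs, lo, hi) := prepB rest
      ((x, lo, hi) :: bs,
       (PySem.List.min? x (fun y => y)).getD 0 + lo,
       (PySem.List.max? x (fun y => y)).getD 0 + hi)

-- Source B's dfs(i, r) with the pruning test 'lo[i+1] <= r-h <= hi[i+1]'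
def dfsB : List (List Int × Int × Int) → Int → List (List Int)
  | [], r => if r = 0 then [[]] else []
  | (x, lo, hi) :: bs, r =>
      x.flatMap (fun h =>
        if lo ≤ r - h ∧ r - h ≤ hi then (dfsB bs (r - h)).map (fun t => h :: t) else [])

def intparts_alt (n : Int) (s : Int) (c : List (Int × List Int)) : List (List Int) :=
  let xs := assignB (List.replicate n.toNat (PySem.List.pyRange 0 (s + 1) 1)) c
  if xs.any (fun x => x.isEmpty) then [] else dfsB (prepB xs).1 s

-- ===== PRECONDITION & SPEC =====
-- Pre_ excludes exactly the inputs where both Pythons raise IndexError: a key k in c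
-- outside the Python index range -n ≤ k < n of the length-n list xs.
def Pre_intparts (n : Int) (s : Int) (c : List (Int × List Int)) : Prop :=
  ∀ p ∈ c, -n ≤ p.1 ∧ p.1 < n
instance (n : Int) (s : Int) (c : List (Int × List Int)) : Decidable (Pre_intparts n s c) := by
  unfold Pre_intparts; infer_instance

def pvWitness_intparts : Int × Int × (List (Int × List Int)) := (2, 3, [(0, [1, 2])])

def Spec_intparts (n : Int) (s : Int) (c : List (Int × List Int)) (out : List (List Int)) : Prop := out = intparts_alt n s c
instance (n : Int) (s : Int) (c : List (Int × List Int)) (out : List (List Int)) : Decidable (Spec_intparts n s c out) := by unfold Spec_intparts; infer_instance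

-- ===== CLAIM =====
def Claim_equal_intparts : Prop := ∀ (n : Int) (s : Int) (c : List (Int × List Int)), Dom_intparts n s c → Pre_intparts n s c → Spec_intparts n s c (intparts n s c)

-- ===== LEMMAS AND PROOFS =====
lemma assign_eq : ∀ (c : List (Int × List Int)) (xs : List (List Int)),
    assignB xs c = assignA xs c := by
  intro c
  induction c with
  | nil => intro xs; rfl
  | cons kv rest ih => intro xs; simp [assignA, assignB, List.foldl] at *; exact ih _

-- every tuple of the Cartesian product has sum between the suffix min-sum and max-sum
lemma prod_sum_bounds : ∀ (xs : List (List Int)) (t : List Int), t ∈ deepforA xs →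
    (prepB xs).2.1 ≤ t.sum ∧ t.sum ≤ (prepB xs).2.2 := by
  intro xs
  induction xs with
  | nil =>
      intro t ht
      simp [deepforA] at ht
      simp [ht, prepB]
  | cons x rest ih =>
      intro t ht
      simp only [deepforA, List.mem_flatMap, List.mem_map] at ht
      obtain ⟨h, hx, t', ht', rfl⟩ := ht
      have hmin : ∃ m, PySem.List.min? x (fun y => y) = some m := by
        cases hm : PySem.List.min? x (fun y => y) with
        | none =>
            rw [PySem.List.min?_eq_none_iff] at hm
            subst hm; simp at hx
        | some m => exact ⟨m, rfl⟩
      have hmax : ∃ m, PySem.List.max? x (fun y => y) = some m := by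
        cases hm : PySem.List.max? x (fun y => y) with
        | none =>
            rw [PySem.List.max?_eq_none_iff] at hm
            subst hm; simp at hx
        | some m => exact ⟨m, rfl⟩
      obtain ⟨mn, hmn⟩ := hmin
      obtain ⟨mx, hmx⟩ := hmax
      have h1 : mn ≤ h := PySem.List.min?_isMin hmn h hx
      have h2 : h ≤ mx := PySem.List.max?_isMax hmx h hx
      have hb := ih t' ht'
      simp only [prepB]
      cases hp : prepB rest with
      | mk bs lohi =>
        cases lohi with
        | mk lo hi =>
          rw [hp] at hb
          simp only [Prod.snd] at hb
          simp only [hmn, hmx, Option.getD_some, List.sum_cons]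
          omega

-- a product with an empty component is empty
lemma prod_empty : ∀ (xs : List (List Int)), xs.any (fun x => x.isEmpty) = true →
    deepforA xs = [] := by
  intro xs
  induction xs with
  | nil => simp
  | cons x rest ih =>
      intro h
      simp only [List.any_cons, Bool.or_eq_true] at h
      rcases h with h | h
      · have : x = [] := by simpa [List.isEmpty_iff] using h
        simp [deepforA, this]
      · simp [deepforA, ih h]

-- the pruned DFS computes exactly the sum-filtered product
lemma dfs_eq_filter : ∀ (xs : List (List Int)) (r : Int),
    dfsB (prepB xs).1 r = (deepforA xs).filter (fun t => t.sum == r) := by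
  intro xs
  induction xs with
  | nil =>
      intro r
      simp only [prepB, dfsB, deepforA]
      by_cases h : r = 0
      · simp [h, List.filter]
      · simp [h, List.filter, beq_eq_false_iff_ne.mpr (Ne.symm h)]
  | cons x rest ih =>
      intro r
      simp only [prepB, deepforA]
      cases hp : prepB rest with
      | mk bs lohi =>
        cases lohi with
        | mk lo hi =>
          simp only [dfsB, List.filter_flatMap]
          congr 1
          funext h
          rw [List.filter_map]
          have hpred : ((fun t => t.sum == r) ∘ (fun t => h :: t)) = (fun t : List Int => t.sum == r - h) := by
            funext t
            simp only [Function.comp, List.sum_cons]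
            exact decide_eq_decide.mpr (by omega)
          rw [hpred]
          have hih : (deepforA rest).filter (fun t => t.sum == r - h) = dfsB bs (r - h) := by
            rw [← ih (r - h), hp]
          rw [hih]
          by_cases hc : lo ≤ r - h ∧ r - h ≤ hi
          · simp [hc]
          · rw [if_neg hc, ← hih]
            have hnil : (deepforA rest).filter (fun t => t.sum == r - h) = [] := by
              rw [List.filter_eq_nil_iff]
              intro t ht
              have hb := prod_sum_bounds rest t ht
              rw [hp] at hb
              simp only [beq_iff_eq]
              simp only [Prod.snd] at hb
              omega
            rw [hnil, List.map_nil]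

-- A's filter over the product equals B's guarded pruned DFS, for any component lists
lemma main_eq (xs : List (List Int)) (s : Int) :
    (deepforA xs).filter (fun x => x.sum == s) =
      if xs.any (fun x => x.isEmpty) = true then [] else dfsB (prepB xs).1 s := by
  by_cases hany : xs.any (fun x => x.isEmpty) = true
  · rw [if_pos hany, prod_empty xs hany, List.filter_nil]
  · rw [if_neg hany, dfs_eq_filter xs s]

-- ===== VERDICT =====
theorem intparts_spec : Claim_equal_intparts := by
  intro n s c _hdom _hpre
  unfold Spec_intparts
  simp only [intparts, intparts_alt]
  rw [assign_eq]
  exact main_eq (assignA (List.replicate n.toNat (PySem.List.pyRange 0 (s + 1) 1)) c) s
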